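-- pv_equiv track=rewrite | github.com/RC219805/800-Picacho-Lane-LUTs | material_response.py | _boxcount
-- ===== SOURCE A (Python) =====
-- from typing import Dict, Iterable, List, Mapping, Sequence, Tuple
--
-- def _boxcount(binary: Sequence[Sequence[bool]], size: int) -> int:
--     """Count non-empty boxes of the given ``size`` for ``binary`` data."""
--
--     if size <= 0:
--         raise ValueError("size must be positive")
--
--     rows = len(binary)
--     cols = len(binary[0]) if rows else 0
--     if rows == 0 or cols == 0:
--         return 0
--
--     trimmed_rows = rows - (rows % size)
--     trimmed_cols = cols - (cols % size)
--     if trimmed_rows == 0 or trimmed_cols == 0: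
--         return 0
--
--     count = 0
--     for row in range(0, trimmed_rows, size):
--         for col in range(0, trimmed_cols, size):
--             occupied = False
--             for dr in range(size):
--                 if occupied:
--                     break
--                 for dc in range(size):
--                     if binary[row + dr][col + dc]:
--                         occupied = True
--                         break
--             if occupied:
--                 count += 1
--
--     return count
-- ===== SOURCE B (Python) =====
-- from typing import Sequence
--
--
-- def _boxcount(binary: Sequence[Sequence[bool]], size: int) -> int:
--     """Count non-empty boxes of the given ``size`` for ``binary`` data."""
--
--     if size <= 0:
--         raise ValueError("size must be positive")
--
--     rows = len(binary)
--     cols = len(binary[0]) if rows else 0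
--     trimmed_rows = rows - rows % size
--     trimmed_cols = cols - cols % size
--
--     total = 0
--     for band in range(0, trimmed_rows, size):
--         occupied_cols = {c // size
--                          for r in range(band, band + size)
--                          for c in range(trimmed_cols)
--                          if binary[r][c]}
--         total += len(occupied_cols)
--     return total
-- ===== Notes on version B (the rewrite author's own statement) =====
-- stated objective: alternative
-- what changed: Replaces the box-by-box triple-nested scan with early exits by a per-band pass: for each row band it collects the occupied box-column indices c//size in a set and sums the set sizes, dropping A's zero-guards (empty ranges already yield 0).
-- outside the precondition, e.g. on _boxcount([[True, True], [True]], 2): A returns 1, B raises IndexError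
import Mathlib
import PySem

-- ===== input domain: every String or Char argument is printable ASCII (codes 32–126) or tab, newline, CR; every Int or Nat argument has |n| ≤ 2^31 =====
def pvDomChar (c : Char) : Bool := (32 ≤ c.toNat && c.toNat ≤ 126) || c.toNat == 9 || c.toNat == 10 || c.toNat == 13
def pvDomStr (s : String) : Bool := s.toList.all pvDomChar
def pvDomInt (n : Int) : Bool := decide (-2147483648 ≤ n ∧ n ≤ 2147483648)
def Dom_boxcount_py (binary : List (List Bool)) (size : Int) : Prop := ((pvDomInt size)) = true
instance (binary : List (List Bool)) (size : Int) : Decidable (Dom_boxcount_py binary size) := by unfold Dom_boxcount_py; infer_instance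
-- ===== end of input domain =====

-- B replaces A's box-by-box triple-nested scan (with early exits) by a per-band pass: for each
-- row band it collects the occupied box-column indices c//size in a set and sums the set sizes
-- (objective: alternative; same asymptotic cost).

-- ===== PORT A =====
-- shared helper: the cell access binary[r][c] (total form; Pre_ keeps every access in range)
def pvCellAcc (binary : List (List Bool)) (r c : Int) : Bool :=
  PySem.List.pyGetD (PySem.List.pyGetD binary r []) c false

def boxcount_py (binary : List (List Bool)) (size : Int) : Int :=
  if size ≤ 0 then 0   -- Python: raise ValueError (excluded by Pre_)
  else
    let rows : Int := PySem.List.len binary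
    let cols : Int := if rows ≠ 0 then PySem.List.len (PySem.List.pyGetD binary 0 []) else 0
    if rows = 0 ∨ cols = 0 then 0
    else
      let trimmed_rows : Int := rows - PySem.Int.mod rows size
      let trimmed_cols : Int := cols - PySem.Int.mod cols size
      if trimmed_rows = 0 ∨ trimmed_cols = 0 then 0
      else
        (PySem.List.pyRange 0 trimmed_rows size).foldl (fun count row =>
          (PySem.List.pyRange 0 trimmed_cols size).foldl (fun count col =>
            if (PySem.List.pyRange 0 size 1).foldl (fun occ dr =>
                if occ then occ
                else (PySem.List.pyRange 0 size 1).foldl (fun occ dc =>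
                  if pvCellAcc binary (row + dr) (col + dc) then true else occ) occ) false
            then count + 1 else count) count) 0

-- ===== PORT B =====
def boxcount_py_alt (binary : List (List Bool)) (size : Int) : Int :=
  if size ≤ 0 then 0   -- Python: raise ValueError (excluded by Pre_)
  else
    let rows : Int := PySem.List.len binary
    let cols : Int := if rows ≠ 0 then PySem.List.len (PySem.List.pyGetD binary 0 []) else 0
    let trimmed_rows : Int := rows - PySem.Int.mod rows size
    let trimmed_cols : Int := cols - PySem.Int.mod cols size
    (PySem.List.pyRange 0 trimmed_rows size).foldl (fun total band =>
      total + PySem.Set.len ((PySem.List.pyRange band (band + size) 1).foldl (fun s r =>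
        (PySem.List.pyRange 0 trimmed_cols 1).foldl (fun s c =>
          if pvCellAcc binary r c then PySem.Set.add s (PySem.Int.floordiv c size) else s) s)
        PySem.Set.empty)) 0

-- ===== PRECONDITION & SPEC =====
-- Pre_ excludes size ≤ 0 (Python A raises ValueError) and ragged grids whose trimmed region
-- contains a row shorter than the trimmed column count: there a scan can hit an IndexError,
-- and whether A survives depends only on the accident of its early exits.
def Pre_boxcount_py (binary : List (List Bool)) (size : Int) : Prop :=
  0 < size ∧ ∀ i : Nat, i < binary.length - binary.length % size.toNat →
    (binary.headD []).length - (binary.headD []).length % size.toNat ≤ (binary.getD i []).length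
instance (binary : List (List Bool)) (size : Int) : Decidable (Pre_boxcount_py binary size) := by
  unfold Pre_boxcount_py; infer_instance

def pvWitness_boxcount_py : List (List Bool) × Int := ([[true, false], [false, true]], 1)

def Spec_boxcount_py (binary : List (List Bool)) (size : Int) (out : Int) : Prop := out = boxcount_py_alt binary size
instance (binary : List (List Bool)) (size : Int) (out : Int) : Decidable (Spec_boxcount_py binary size out) := by unfold Spec_boxcount_py; infer_instance

-- ===== CLAIM (what is proved, stated in full; the proofs are below) =====
def Claim_equal_boxcount_py : Prop := ∀ (binary : List (List Bool)) (size : Int), Dom_boxcount_py binary size → Pre_boxcount_py binary size → Spec_boxcount_py binary size (boxcount_py binary size)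

-- ===== LEMMAS AND PROOFS =====

-- the box-occupancy predicate A's broken-out-of loops compute
def pvOcc (binary : List (List Bool)) (size row col : Int) : Bool :=
  (PySem.List.pyRange 0 size 1).any fun dr =>
    (PySem.List.pyRange 0 size 1).any fun dc => pvCellAcc binary (row + dr) (col + dc)

lemma pv_fd_add (size k d : Int) (hs : 0 < size) (h0 : 0 ≤ d) (h1 : d < size) :
    PySem.Int.floordiv (k * size + d) size = k := by
  rw [PySem.Int.floordiv_eq_iff_of_pos hs]
  have h2 : (k + 1) * size = k * size + size := by ring
  constructor <;> linarith

lemma pv_fd_dvd (size a : Int) (h : size ∣ a) : PySem.Int.floordiv a size * size = a := by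
  have h2 := PySem.Int.floordiv_mul_add_mod a size
  have h3 : PySem.Int.mod a size = 0 := (PySem.Int.mod_eq_zero_iff_dvd a size).mpr h
  linarith

lemma pv_nodup_pyRange (a b s : Int) (hs : 0 < s) : (PySem.List.pyRange a b s).Nodup := by
  rw [PySem.List.pyRange_of_pos a b hs]
  refine List.Nodup.map ?_ (List.nodup_range)
  intro x y h
  have : (s : Int) * x = s * y := by linarith
  exact_mod_cast mul_left_cancel₀ (by omega : (s : Int) ≠ 0) this

-- A's nested counting loop is countP over each row band
lemma pv_nestedA (la lb : List Int) (q : Int → Int → Bool) (init : Int) :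
    la.foldl (fun c row => lb.foldl (fun c col => if q row col then c + 1 else c) c) init
    = la.foldl (fun c row => c + (lb.countP fun col => q row col : Int)) init := by
  refine PySem.List.foldl_congr_mem la _ _ init ?_
  intro acc row _
  exact PySem.List.foldl_if_add_one _ lb _

-- B's inner conditional-add double loop is Set.ofList of the filtered, mapped product list
lemma pv_nestedB {β : Type} [BEq β] [LawfulBEq β] (la lb : List Int) (q : Int → Int → Bool)
    (f : Int → Int → β) (init : PySem.Set β) :
    la.foldl (fun s r => lb.foldl (fun s c => if q r c then PySem.Set.add s (f r c) else s) s) init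
    = PySem.Set.update init (((la ×ˢ lb).filter fun p => q p.1 p.2).map fun p => f p.1 p.2) := by
  induction la generalizing init with
  | nil => simp [PySem.Set.update_nil]
  | cons a l ih =>
      simp only [List.foldl_cons]
      rw [PySem.List.foldl_if_eq_foldl_filter, ← PySem.Set.update_map_eq_foldl_add, ih,
        ← PySem.Set.update_append]
      congr 1
      simp [List.product_cons, List.filter_append, List.filter_map, List.map_map, Function.comp_def]

-- per band: the number of occupied boxes in the band equals the size of the set of occupied
-- box-column indices that B collects for that band
lemma pv_band (binary : List (List Bool)) (size tc band : Int) (hs : 0 < size)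
    (htc : size ∣ tc) :
    ((PySem.List.pyRange 0 tc size).countP fun col => pvOcc binary size band col)
    = (PySem.Set.ofList (((PySem.List.pyRange band (band + size) 1 ×ˢ
          PySem.List.pyRange 0 tc 1).filter (fun p => pvCellAcc binary p.1 p.2)).map
          fun p => PySem.Int.floordiv p.2 size)).length := by
  have hfd_mul : ∀ k : Int, PySem.Int.floordiv (k * size) size = k := by
    intro k
    simpa using pv_fd_add size k 0 hs le_rfl hs
  have hfd_shift : ∀ a d : Int, size ∣ a → 0 ≤ d → d < size →
      PySem.Int.floordiv (a + d) size = PySem.Int.floordiv a size := by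
    rintro a d ⟨k, hk⟩ h0 h1
    subst hk
    rw [mul_comm size k, pv_fd_add size k d hs h0 h1, hfd_mul]
  have hub : ∀ a d : Int, size ∣ a → a < tc → d < size → a + d < tc := by
    rintro a d ⟨k, hk⟩ hab hd
    obtain ⟨m, hm⟩ := htc
    subst hk; subst hm
    have hkm : k < m := lt_of_mul_lt_mul_left hab (le_of_lt hs)
    have h2 : size * (k + 1) ≤ size * m := mul_le_mul_of_nonneg_left (by omega) (le_of_lt hs)
    have h3 : size * (k + 1) = size * k + size := by ring
    linarith
  rw [List.countP_eq_length_filter]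
  rw [← List.length_map (as := ((PySem.List.pyRange 0 tc size).filter
        fun col => pvOcc binary size band col))
      (fun col : Int => PySem.Int.floordiv col size)]
  apply List.Perm.length_eq
  refine (List.perm_ext_iff_of_nodup ?_ (PySem.Set.nodup_ofList _)).mpr ?_
  · refine List.Nodup.map_on ?_ (List.Nodup.filter _ (pv_nodup_pyRange 0 tc size hs))
    intro x hx y hy hxy
    have hx' := List.mem_of_mem_filter hx
    have hy' := List.mem_of_mem_filter hy
    have dx : size ∣ x := by
      simpa using ((PySem.List.mem_pyRange_iff_of_pos hs _).mp hx').2.2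
    have dy : size ∣ y := by
      simpa using ((PySem.List.mem_pyRange_iff_of_pos hs _).mp hy').2.2
    calc x = PySem.Int.floordiv x size * size := (pv_fd_dvd size x dx).symm
      _ = PySem.Int.floordiv y size * size := by rw [hxy]
      _ = y := pv_fd_dvd size y dy
  · intro x
    rw [PySem.Set.mem_ofList]
    simp only [List.mem_map]
    constructor
    · rintro ⟨col, hcol, rfl⟩
      rw [List.mem_filter] at hcol
      obtain ⟨hcmem, hcP⟩ := hcol
      have h1 := (PySem.List.mem_pyRange_iff_of_pos hs _).mp hcmem
      have d1 : size ∣ col := by simpa using h1.2.2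
      simp only [pvOcc, List.any_eq_true] at hcP
      obtain ⟨dr, hdr, dc, hdc, hcell⟩ := hcP
      rw [PySem.List.mem_pyRange_one] at hdr hdc
      refine ⟨(band + dr, col + dc), ?_, ?_⟩
      · rw [List.mem_filter]
        refine ⟨?_, by simpa using hcell⟩
        rw [List.mem_product]
        constructor <;> rw [PySem.List.mem_pyRange_one]
        · omega
        · exact ⟨by omega, hub col dc d1 h1.2.1 hdc.2⟩
      · exact hfd_shift col dc d1 hdc.1 hdc.2
    · rintro ⟨⟨r, c⟩, hq, rfl⟩
      rw [List.mem_filter] at hq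
      obtain ⟨hqmem, hqcell⟩ := hq
      rw [List.mem_product] at hqmem
      obtain ⟨hr, hc⟩ := hqmem
      rw [PySem.List.mem_pyRange_one] at hr hc
      have hfd : 0 ≤ PySem.Int.floordiv c size := by
        rw [PySem.Int.le_floordiv_iff_mul_le hs]; omega
      have hmod := PySem.Int.floordiv_mul_add_mod c size
      have hmn := PySem.Int.mod_nonneg c hs
      refine ⟨PySem.Int.floordiv c size * size, ?_, by simpa using hfd_mul (PySem.Int.floordiv c size)⟩
      rw [List.mem_filter]
      constructor
      · rw [PySem.List.mem_pyRange_iff_of_pos hs]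
        exact ⟨mul_nonneg hfd (le_of_lt hs), by linarith [hc.2],
          by simp [dvd_mul_left size (PySem.Int.floordiv c size)]⟩
      · simp only [pvOcc, List.any_eq_true]
        refine ⟨r - band, ?_, PySem.Int.mod c size, ?_, ?_⟩
        · rw [PySem.List.mem_pyRange_one]; omega
        · rw [PySem.List.mem_pyRange_one]
          exact ⟨hmn, PySem.Int.mod_lt c hs⟩
        · have hr' : band + (r - band) = r := by ring
          rw [hr']
          have hc' : PySem.Int.floordiv c size * size + PySem.Int.mod c size = c := hmod
          rw [hc']
          simpa using hqcell

lemma pv_main (binary : List (List Bool)) (size tr tc : Int) (hs : 0 < size)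
    (htc : size ∣ tc) :
    (PySem.List.pyRange 0 tr size).foldl (fun count row =>
      (PySem.List.pyRange 0 tc size).foldl (fun count col =>
        if (PySem.List.pyRange 0 size 1).foldl (fun occ dr =>
            if occ then occ
            else (PySem.List.pyRange 0 size 1).foldl (fun occ dc =>
              if pvCellAcc binary (row + dr) (col + dc) then true else occ) occ) false
        then count + 1 else count) count) 0
    = (PySem.List.pyRange 0 tr size).foldl (fun total band =>
        total + PySem.Set.len ((PySem.List.pyRange band (band + size) 1).foldl (fun s r =>
          (PySem.List.pyRange 0 tc 1).foldl (fun s c =>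
            if pvCellAcc binary r c then PySem.Set.add s (PySem.Int.floordiv c size) else s) s)
          PySem.Set.empty)) 0 := by
  have hocc : ∀ row col : Int,
      ((PySem.List.pyRange 0 size 1).foldl (fun occ dr =>
        if occ then occ
        else (PySem.List.pyRange 0 size 1).foldl (fun occ dc =>
          if pvCellAcc binary (row + dr) (col + dc) then true else occ) occ) false)
      = pvOcc binary size row col := by
    intro row col
    have h1 := PySem.List.foldl_congr_mem (PySem.List.pyRange 0 size 1)
      (fun occ dr =>
        if occ then occ
        else (PySem.List.pyRange 0 size 1).foldl (fun occ dc =>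
          if pvCellAcc binary (row + dr) (col + dc) then true else occ) occ)
      (fun occ dr =>
        if (PySem.List.pyRange 0 size 1).any (fun dc => pvCellAcc binary (row + dr) (col + dc))
        then true else occ) false
      (by intro acc x _; dsimp only; rw [PySem.List.foldl_if_true_eq]; cases acc <;> simp)
    rw [h1, PySem.List.foldl_if_true_eq]
    simp [pvOcc]
  simp only [hocc]
  rw [pv_nestedA]
  refine PySem.List.foldl_congr_mem _ _ _ 0 ?_
  intro acc band _
  rw [pv_nestedB _ _ (fun r c => pvCellAcc binary r c)
      (fun _ c => PySem.Int.floordiv c size), PySem.Set.update_empty,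
    pv_band binary size tc band hs htc]
  simp [PySem.Set.len]

lemma pv_AB_eq (binary : List (List Bool)) (size : Int) (hs : 0 < size) :
    boxcount_py binary size = boxcount_py_alt binary size := by
  have hns : ¬ size ≤ 0 := by omega
  have hdvd : ∀ a : Int, size ∣ a - PySem.Int.mod a size := by
    intro a
    refine ⟨PySem.Int.floordiv a size, ?_⟩
    have h1 := PySem.Int.floordiv_mul_add_mod a size
    have h2 : size * PySem.Int.floordiv a size = PySem.Int.floordiv a size * size :=
      mul_comm _ _
    linarith
  have hzero : ∀ tr : Int,
      (PySem.List.pyRange 0 tr size).foldl (fun (total : Int) band =>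
        total + PySem.Set.len ((PySem.List.pyRange band (band + size) 1).foldl (fun s r =>
          (PySem.List.pyRange 0 (0 : Int) 1).foldl (fun s c =>
            if pvCellAcc binary r c then PySem.Set.add s (PySem.Int.floordiv c size) else s) s)
          PySem.Set.empty)) 0 = 0 := by
    intro tr
    have hnil : PySem.List.pyRange 0 (0 : Int) 1 = [] := by decide
    rw [PySem.List.foldl_congr_mem _ _ (fun (t : Int) (_ : Int) => t) _
      (by intro acc band _; simp [hnil, PySem.Set.len, PySem.Set.empty])]
    rw [PySem.List.foldl_ignore]
  unfold boxcount_py boxcount_py_alt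
  simp only [if_neg hns]
  set rows : Int := PySem.List.len binary with hrows
  set cols : Int := if rows ≠ 0 then PySem.List.len (PySem.List.pyGetD binary 0 []) else 0
    with hcols
  have hrnn : 0 ≤ rows := by simp [hrows, PySem.List.len]
  have hcnn : 0 ≤ cols := by
    rw [hcols]; split <;> simp [PySem.List.len]
  have hmr := PySem.Int.mod_nonneg rows hs
  have hmc := PySem.Int.mod_nonneg cols hs
  by_cases h0 : rows = 0 ∨ cols = 0
  · rw [if_pos h0]
    rcases h0 with h | h
    · have htr : rows - PySem.Int.mod rows size = 0 := by
        rw [h]; simp [PySem.Int.mod]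
      rw [htr]
      have hnil : PySem.List.pyRange 0 0 size = [] := by
        simp [PySem.List.pyRange_of_pos _ _ hs]
      rw [hnil]; rfl
    · have htc : cols - PySem.Int.mod cols size = 0 := by
        rw [h]; simp [PySem.Int.mod]
      rw [htc]
      exact (hzero _).symm
  · rw [if_neg h0]
    by_cases hg : rows - PySem.Int.mod rows size = 0 ∨ cols - PySem.Int.mod cols size = 0
    · rw [if_pos hg]
      rcases hg with h | h
      · rw [h]
        have hnil : PySem.List.pyRange 0 0 size = [] := by
          simp [PySem.List.pyRange_of_pos _ _ hs]
        rw [hnil]; rfl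
      · rw [h]
        exact (hzero _).symm
    · rw [if_neg hg]
      exact pv_main binary size _ _ hs (hdvd cols)

-- ===== VERDICT (by name: the statement is the Claim_ definition above) =====
theorem boxcount_py_spec : Claim_equal_boxcount_py := by
  intro binary size _ hpre
  unfold Spec_boxcount_py
  exact pv_AB_eq binary size hpre.1
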